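-- pv_equiv track=rewrite | github.com/vltian/some_example_repo | lesson_4_imp_gen/hw_46.py | r_el
-- ===== SOURCE A (Python) =====
-- from itertools import count, cycle
--
-- def r_el (b, end):
--     cnt = 0
--     for el in cycle (b):
--         if cnt == end:
--             break
--         else:
--             yield (el)
--         cnt += 1
-- ===== SOURCE B (Python) =====
-- def r_el(b, end):
--     # Block-copy strategy: emit whole copies of b, then a prefix, instead of
--     # walking a cyclic iterator element by element with a counter.
--     buf = list(b)
--     if not buf or end <= 0:
--         return
--     full, rem = divmod(end, len(buf))
--     for _ in range(full):
--         yield from buf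
--     yield from buf[:rem]
-- ===== Notes on version B (the rewrite author's own statement) =====
-- stated objective: alternative
-- what changed: B replaces the per-element cycle(b)+counter loop by block replication: it computes divmod(end, len(b)) once and yields `full` whole copies of b followed by the b[:rem] prefix, with no cyclic iterator and no per-element stop test.
import Mathlib
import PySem

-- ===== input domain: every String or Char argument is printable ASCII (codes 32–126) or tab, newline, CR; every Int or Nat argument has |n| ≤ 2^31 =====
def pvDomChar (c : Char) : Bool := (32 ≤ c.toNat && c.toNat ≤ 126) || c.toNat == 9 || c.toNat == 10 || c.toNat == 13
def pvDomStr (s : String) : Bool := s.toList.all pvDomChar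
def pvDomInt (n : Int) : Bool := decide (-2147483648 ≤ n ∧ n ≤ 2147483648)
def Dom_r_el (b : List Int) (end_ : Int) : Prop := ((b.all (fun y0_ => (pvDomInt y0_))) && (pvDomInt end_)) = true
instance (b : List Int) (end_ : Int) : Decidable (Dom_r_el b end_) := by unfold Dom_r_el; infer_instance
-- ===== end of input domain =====

-- B replaces the per-element cycle(b)+counter loop by block replication: full copies of b, then a prefix (objective: alternative).
-- Both Pythons are generators; the ports return the list of yielded elements.
-- ===== PORT A =====
-- loop over cycle(b): consume the current chunk `cur`, refilling from b when it empties; stop when cnt reaches end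
def rElLoop (b : List Int) : List Int → Nat → List Int
  | _, 0 => []
  | x :: xs, n+1 => x :: rElLoop b xs n
  | [], n+1 =>
    match b with
    | [] => []
    | x :: xs => x :: rElLoop b xs n

def r_el (b : List Int) (end_ : Int) : List Int := rElLoop b b end_.toNat

-- ===== PORT B =====
def r_el_alt (b : List Int) (end_ : Int) : List Int :=
  if b = [] ∨ end_ ≤ 0 then []
  else
    let full := end_.toNat / b.length
    let rem := end_.toNat % b.length
    (List.replicate full b).flatten ++ b.take rem

-- ===== PRECONDITION & SPEC =====
-- Pre_ excludes negative end with nonempty b: there A loops forever (cnt never equals end), returning nothing.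
def Pre_r_el (b : List Int) (end_ : Int) : Prop := b = [] ∨ 0 ≤ end_
instance (b : List Int) (end_ : Int) : Decidable (Pre_r_el b end_) := by unfold Pre_r_el; infer_instance
def pvWitness_r_el : List Int × Int := ([1, 2, 3], 7)

def Spec_r_el (b : List Int) (end_ : Int) (out : List Int) : Prop := out = r_el_alt b end_
instance (b : List Int) (end_ : Int) (out : List Int) : Decidable (Spec_r_el b end_ out) := by unfold Spec_r_el; infer_instance

-- ===== CLAIM (what is proved, stated in full; the proofs are below) =====
def Claim_equal_r_el : Prop := ∀ (b : List Int) (end_ : Int), Dom_r_el b end_ → Pre_r_el b end_ → Spec_r_el b end_ (r_el b end_)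

-- ===== LEMMAS AND PROOFS =====
-- with fuel ≤ length of the current chunk, the loop just takes a prefix of the chunk
lemma rElLoop_take (b cur : List Int) (fuel : Nat) (h : fuel ≤ cur.length) :
    rElLoop b cur fuel = cur.take fuel := by
  induction cur generalizing fuel with
  | nil =>
    have : fuel = 0 := by simpa using h
    subst this; simp [rElLoop]
  | cons c cs ih =>
    cases fuel with
    | zero => simp [rElLoop]
    | succ m => simp [rElLoop, ih m (by simpa using h)]

-- with enough fuel, the loop emits the whole current chunk and restarts on b
lemma rElLoop_exhaust (b cur : List Int) (fuel : Nat) (hb : b ≠ []) (h : cur.length ≤ fuel) :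
    rElLoop b cur fuel = cur ++ rElLoop b b (fuel - cur.length) := by
  induction cur generalizing fuel with
  | nil =>
    cases fuel with
    | zero =>
      obtain ⟨x, xs, rfl⟩ := List.exists_cons_of_ne_nil hb
      simp [rElLoop]
    | succ m =>
      obtain ⟨x, xs, rfl⟩ := List.exists_cons_of_ne_nil hb
      simp [rElLoop]
  | cons c cs ih =>
    cases fuel with
    | zero => simp at h
    | succ m =>
      simp only [rElLoop, List.cons_append, List.length_cons, Nat.succ_sub_succ]
      rw [ih m (by simpa using h)]

-- the loop over cycle(b) equals block replication: ⌊fuel/n⌋ full copies of b plus a prefix of length fuel % n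
lemma rElLoop_blocks (b : List Int) (hb : b ≠ []) (fuel : Nat) :
    rElLoop b b fuel
      = (List.replicate (fuel / b.length) b).flatten ++ b.take (fuel % b.length) := by
  induction fuel using Nat.strong_induction_on with
  | _ fuel ih =>
    have hn : 0 < b.length := List.length_pos_iff.mpr hb
    rcases Nat.lt_or_ge fuel b.length with hlt | hge
    · rw [Nat.div_eq_of_lt hlt, Nat.mod_eq_of_lt hlt]
      simpa using rElLoop_take b b fuel (le_of_lt hlt)
    · rw [rElLoop_exhaust b b fuel hb hge, ih (fuel - b.length) (by omega)]
      have hdiv : fuel / b.length = (fuel - b.length) / b.length + 1 := by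
        rw [Nat.div_eq fuel b.length]; simp [hn, hge]
      have hmod : fuel % b.length = (fuel - b.length) % b.length := by
        rw [Nat.mod_eq fuel b.length]; simp [hn, hge]
      rw [hdiv, hmod, List.replicate_succ, List.flatten_cons, List.append_assoc]

-- ===== VERDICT (by name: the statement is the Claim_ definition above) =====
theorem r_el_spec : Claim_equal_r_el := by
  intro b end_ _ hpre
  unfold Spec_r_el r_el r_el_alt
  by_cases hb : b = []
  · subst hb
    cases h : end_.toNat with
    | zero => simp [rElLoop]
    | succ m => simp [rElLoop]
  · rcases hpre with rfl | hpos
    · exact absurd rfl hb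
    · by_cases hz : end_ ≤ 0
      · have : end_ = 0 := le_antisymm hz hpos
        subst this
        simp [rElLoop, hb]
      · simp only [hb, hz, or_self, if_false]
        exact rElLoop_blocks b hb end_.toNat
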